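-- pv_equiv track=rewrite | github.com/Learn-Everything-Leo/leetcode_problems | maxmium_score2.py | maxmiumScore
-- ===== SOURCE A (Python) =====
-- from typing import List
--
-- def maxmiumScore(cards: List[int], cnt: int) -> int:
--     cards.sort(reverse=True)
--     ans = 0
--     tmp = 0
--     odd = even = -1
--     for i in range(cnt):
--         tmp += cards[i]
--         if cards[i] % 2 == 1:
--             odd = cards[i]
--         else:
--             even = cards[i]
--     if tmp % 2 == 0:
--         return tmp
--     for i in range(cnt, len(cards)):
--         if cards[i] % 2 == 1:
--             if even != -1:
--                 ans = max(ans, tmp - even + cards[i])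
--         else:
--             if odd != -1:
--                 ans = max(ans, tmp - odd + cards[i])
--
--     return ans
-- ===== SOURCE B (Python) =====
-- def maxmiumScore(cards, cnt):
--     # Partition by parity, sort each class once, then pick the top `cnt` cards
--     # with a two-pointer merge; the tracked minima of the picked block and the
--     # swap candidates are read directly off the two pointers. Does not mutate
--     # the input list (A sorts it in place).
--     odds = sorted([c for c in cards if c % 2 == 1], reverse=True)
--     evens = sorted([c for c in cards if c % 2 == 0], reverse=True)
--     i = j = 0
--     for _ in range(cnt):
--         if j >= len(evens) or (i < len(odds) and odds[i] >= evens[j]):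
--             i += 1
--         else:
--             j += 1
--     tmp = sum(odds[:i]) + sum(evens[:j])
--     if tmp % 2 == 0:
--         return tmp
--     odd = odds[i - 1] if i > 0 else -1
--     even = evens[j - 1] if j > 0 else -1
--     best = 0
--     if even != -1 and i < len(odds):
--         best = max(best, tmp - even + odds[i])
--     if odd != -1 and j < len(evens):
--         best = max(best, tmp - odd + evens[j])
--     return best
-- ===== Notes on version B (the rewrite author's own statement) =====
-- stated objective: alternative
-- what changed: Instead of sorting the whole list and scanning it twice (A's state-machine loop over the top cnt cards plus a running-max scan over every remaining card), B partitions the cards by parity, sorts each class, and selects the top cnt cards with a two-pointer merge; the block sum, the tracked minima and both swap candidates are read directly off the two pointers, so no scan of the remainder happens. B also does not mutate the input list.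
import Mathlib
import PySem

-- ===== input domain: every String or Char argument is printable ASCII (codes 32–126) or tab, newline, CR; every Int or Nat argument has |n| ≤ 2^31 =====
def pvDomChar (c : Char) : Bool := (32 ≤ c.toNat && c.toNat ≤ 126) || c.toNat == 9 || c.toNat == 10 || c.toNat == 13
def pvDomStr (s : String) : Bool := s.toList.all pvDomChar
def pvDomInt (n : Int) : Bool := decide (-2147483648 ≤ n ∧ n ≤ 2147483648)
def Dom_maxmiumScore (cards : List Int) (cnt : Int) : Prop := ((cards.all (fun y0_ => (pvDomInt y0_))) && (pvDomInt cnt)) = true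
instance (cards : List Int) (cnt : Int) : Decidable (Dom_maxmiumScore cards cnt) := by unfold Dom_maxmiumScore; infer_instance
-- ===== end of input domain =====

-- B partitions the cards by parity, sorts each class once, and picks the top cnt cards with a
-- two-pointer merge; the tracked minima of the picked block and the swap candidates are read off
-- the two pointers (objective: alternative). NOTE: A sorts `cards` in place (an observable
-- mutation); B does not — the equivalence proved here is about the RETURN value only.

-- ===== PORT A =====
-- body of A's first loop: tmp accumulation and the odd/even trackers
def stepTopA (st : Int × Int × Int) (c : Int) : Int × Int × Int :=
  (st.1 + c,
   if PySem.Int.mod c 2 = 1 then c else st.2.1,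
   if PySem.Int.mod c 2 = 1 then st.2.2 else c)

-- body of A's second loop: the running max over swap candidates
def stepRestA (tmp odd even ans c : Int) : Int :=
  if PySem.Int.mod c 2 = 1 then (if even ≠ -1 then max ans (tmp - even + c) else ans)
  else (if odd ≠ -1 then max ans (tmp - odd + c) else ans)

def maxmiumScore (cards : List Int) (cnt : Int) : Int :=
  let cards2 := PySem.List.sorted cards (fun x => x) true
  let st := (PySem.List.pyRange 0 cnt 1).foldl
      (fun st i => stepTopA st (PySem.List.pyGetD cards2 i 0)) (0, -1, -1)
  if PySem.Int.mod st.1 2 = 0 then st.1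
  else
    (PySem.List.pyRange cnt (PySem.List.len cards2) 1).foldl
      (fun ans i => stepRestA st.1 st.2.1 st.2.2 ans (PySem.List.pyGetD cards2 i 0)) 0

-- ===== PORT B =====
-- body of B's selection loop: advance the odd pointer if the next odd card is the larger head
def stepB (odds evens : List Int) (ij : Int × Int) : Int × Int :=
  if PySem.List.len evens ≤ ij.2 ∨
      (ij.1 < PySem.List.len odds ∧ PySem.List.pyGetD evens ij.2 0 ≤ PySem.List.pyGetD odds ij.1 0)
  then (ij.1 + 1, ij.2) else (ij.1, ij.2 + 1)

def maxmiumScore_alt (cards : List Int) (cnt : Int) : Int :=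
  let odds := PySem.List.sorted (cards.filter (fun c => PySem.Int.mod c 2 = 1)) (fun x => x) true
  let evens := PySem.List.sorted (cards.filter (fun c => PySem.Int.mod c 2 = 0)) (fun x => x) true
  let ij := (PySem.List.pyRange 0 cnt 1).foldl (fun ij _ => stepB odds evens ij) (0, 0)
  let tmp := (PySem.List.slice odds none (some ij.1)).sum + (PySem.List.slice evens none (some ij.2)).sum
  if PySem.Int.mod tmp 2 = 0 then tmp
  else
    let odd := if 0 < ij.1 then PySem.List.pyGetD odds (ij.1 - 1) 0 else -1
    let even := if 0 < ij.2 then PySem.List.pyGetD evens (ij.2 - 1) 0 else -1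
    let best : Int := 0
    let best := if even ≠ -1 ∧ ij.1 < PySem.List.len odds
      then max best (tmp - even + PySem.List.pyGetD odds ij.1 0) else best
    let best := if odd ≠ -1 ∧ ij.2 < PySem.List.len evens
      then max best (tmp - odd + PySem.List.pyGetD evens ij.2 0) else best
    best

-- ===== PRECONDITION & SPEC =====
-- Pre_ excludes only cnt > len(cards), where A raises IndexError.
def Pre_maxmiumScore (cards : List Int) (cnt : Int) : Prop :=
  cnt ≤ (cards.length : Int)
instance (cards : List Int) (cnt : Int) : Decidable (Pre_maxmiumScore cards cnt) := by
  unfold Pre_maxmiumScore; infer_instance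

def pvWitness_maxmiumScore : List Int × Int := ([3, 2, 1], 2)

def Spec_maxmiumScore (cards : List Int) (cnt : Int) (out : Int) : Prop := out = maxmiumScore_alt cards cnt
instance (cards : List Int) (cnt : Int) (out : Int) : Decidable (Spec_maxmiumScore cards cnt out) := by unfold Spec_maxmiumScore; infer_instance

-- ===== CLAIM (what is proved, stated in full; the proofs are below) =====
def Claim_equal_maxmiumScore : Prop := ∀ (cards : List Int) (cnt : Int), Dom_maxmiumScore cards cnt → Pre_maxmiumScore cards cnt → Spec_maxmiumScore cards cnt (maxmiumScore cards cnt)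

-- ===== LEMMAS AND PROOFS =====

-- for i in range(n): f(acc, xs[i])  =  fold over take n (n within bounds)
theorem pv_foldl_range_take {β : Type} (xs : List Int) (d : Int) (f : β → Int → β) (init : β)
    (n : Nat) (h : n ≤ xs.length) :
    (PySem.List.pyRange 0 (n : Int) 1).foldl (fun acc i => f acc (PySem.List.pyGetD xs i d)) init
      = (xs.take n).foldl f init := by
  induction n generalizing init with
  | zero => simp [PySem.List.pyRange_one_eq_nil (by omega : (0:Int) ≤ 0)]
  | succ m ih =>
    have hm : m < xs.length := by omega
    have h1 : ((m+1 : Nat) : Int) = (m : Int) + 1 := by push_cast; ring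
    rw [h1, PySem.List.pyRange_one_succ_right (by positivity), List.foldl_append,
        ih init (by omega)]
    have ht : xs.take (m+1) = xs.take m ++ [xs[m]] := by
      rw [List.take_add_one]; simp [List.getElem?_eq_getElem hm]
    rw [ht, List.foldl_append]
    simp [PySem.List.pyGetD_natCast, List.getD, List.getElem?_eq_getElem hm]

-- A's triple-state loop splits into the sum and the two last-match trackers
theorem pv_stepTopA_foldl (xs : List Int) (t o e : Int) :
    xs.foldl stepTopA (t, o, e) =
      (t + xs.sum,
       xs.foldl (fun acc c => if PySem.Int.mod c 2 = 1 then c else acc) o,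
       xs.foldl (fun acc c => if PySem.Int.mod c 2 = 1 then acc else c) e) := by
  induction xs generalizing t o e with
  | nil => simp
  | cons x xs ih =>
    simp only [List.foldl_cons, stepTopA, List.sum_cons]
    rw [ih]
    congr 1
    ring

-- A's odd tracker is the last element of the odd-filtered list
theorem pv_odd_fold (xs : List Int) (d : Int) :
    xs.foldl (fun acc c => if PySem.Int.mod c 2 = 1 then c else acc) d
      = ((xs.filter (fun c => PySem.Int.mod c 2 = 1)).getLast?).getD d := by
  induction xs generalizing d with
  | nil => rfl
  | cons x t ih =>
    by_cases hx : PySem.Int.mod x 2 = 1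
    · rw [List.foldl_cons, List.filter_cons_of_pos (by simpa using hx), if_pos hx, ih x]
      cases hf : t.filter (fun c => PySem.Int.mod c 2 = 1) with
      | nil => simp
      | cons y ys =>
        rw [List.getLast?_cons_cons, List.getLast?_eq_some_getLast (l := y::ys) (by simp)]; rfl
    · rw [List.foldl_cons, List.filter_cons_of_neg (by simpa using hx), if_neg hx]
      exact ih d

-- A's even tracker is the last element of the even-filtered list
theorem pv_even_fold (xs : List Int) (d : Int) :
    xs.foldl (fun acc c => if PySem.Int.mod c 2 = 1 then acc else c) d
      = ((xs.filter (fun c => PySem.Int.mod c 2 = 0)).getLast?).getD d := by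
  induction xs generalizing d with
  | nil => rfl
  | cons x t ih =>
    by_cases hx : PySem.Int.mod x 2 = 1
    · rw [List.foldl_cons, if_pos hx, ih d,
          List.filter_cons_of_neg (by simp only [decide_eq_true_eq, hx]; decide)]
    · have hx0 : PySem.Int.mod x 2 = 0 := (PySem.Int.mod_two_eq x).resolve_right hx
      rw [List.foldl_cons, if_neg hx, ih x, List.filter_cons_of_pos (by simpa using hx0)]
      cases hf : t.filter (fun c => PySem.Int.mod c 2 = 0) with
      | nil => simp
      | cons y ys =>
        rw [List.getLast?_cons_cons, List.getLast?_eq_some_getLast (l := y::ys) (by simp)]; rfl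

-- the start and every fired swap candidate are below A's loop result
theorem pv_stepRest_bounds (tmp odd even : Int) (L : List Int) (a : Int) :
    a ≤ L.foldl (stepRestA tmp odd even) a ∧
    (∀ c ∈ L, PySem.Int.mod c 2 = 1 → even ≠ -1 → tmp - even + c ≤ L.foldl (stepRestA tmp odd even) a) ∧
    (∀ c ∈ L, PySem.Int.mod c 2 ≠ 1 → odd ≠ -1 → tmp - odd + c ≤ L.foldl (stepRestA tmp odd even) a) := by
  induction L generalizing a with
  | nil => simp
  | cons x t ih =>
    have hstep : a ≤ stepRestA tmp odd even a x := by
      unfold stepRestA; split_ifs <;> simp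
    obtain ⟨ih1, ih2, ih3⟩ := ih (stepRestA tmp odd even a x)
    refine ⟨le_trans hstep ih1, ?_, ?_⟩
    · intro c hc h1 h2
      rcases List.mem_cons.mp hc with rfl | hc'
      · refine le_trans ?_ ih1
        unfold stepRestA; rw [if_pos h1, if_pos h2]; exact le_max_right _ _
      · exact ih2 c hc' h1 h2
    · intro c hc h1 h2
      rcases List.mem_cons.mp hc with rfl | hc'
      · refine le_trans ?_ ih1
        unfold stepRestA; rw [if_neg h1, if_pos h2]; exact le_max_right _ _
      · exact ih3 c hc' h1 h2

-- A's loop result is below any bound dominating the start and every fired candidate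
theorem pv_stepRest_le (tmp odd even : Int) (L : List Int) (a b : Int)
    (ha : a ≤ b)
    (h1 : ∀ c ∈ L, PySem.Int.mod c 2 = 1 → even ≠ -1 → tmp - even + c ≤ b)
    (h2 : ∀ c ∈ L, PySem.Int.mod c 2 ≠ 1 → odd ≠ -1 → tmp - odd + c ≤ b) :
    L.foldl (stepRestA tmp odd even) a ≤ b := by
  induction L generalizing a with
  | nil => simpa
  | cons x t ih =>
    rw [List.foldl_cons]
    refine ih _ ?_ (fun c hc => h1 c (List.mem_cons_of_mem _ hc)) (fun c hc => h2 c (List.mem_cons_of_mem _ hc))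
    unfold stepRestA
    split_ifs with hx he ho
    · exact max_le ha (h1 x (by simp) hx he)
    · exact ha
    · exact max_le ha (h2 x (by simp) hx ho)
    · exact ha

-- A's second loop equals the two closed-form candidate maxima
theorem pv_rest_eq (tmp odd even : Int) (rest : List Int) :
    rest.foldl (stepRestA tmp odd even) 0 =
      (let b1 : Int :=
        match PySem.List.max? (rest.filter (fun c => PySem.Int.mod c 2 = 1)) (fun x => x) with
        | some m => if even ≠ -1 then max 0 (tmp - even + m) else 0
        | none => 0
      match PySem.List.max? (rest.filter (fun c => PySem.Int.mod c 2 = 0)) (fun x => x) with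
        | some m => if odd ≠ -1 then max b1 (tmp - odd + m) else b1
        | none => b1) := by
  obtain ⟨hR0, hR1, hR2⟩ := pv_stepRest_bounds tmp odd even rest 0
  have hmemOdd : ∀ c ∈ rest, PySem.Int.mod c 2 = 1 →
      c ∈ rest.filter (fun c => PySem.Int.mod c 2 = 1) :=
    fun c hc h => List.mem_filter.mpr ⟨hc, by simp only [decide_eq_true_eq]; exact h⟩
  have hmemEven : ∀ c ∈ rest, PySem.Int.mod c 2 ≠ 1 →
      c ∈ rest.filter (fun c => PySem.Int.mod c 2 = 0) :=
    fun c hc h => List.mem_filter.mpr ⟨hc, by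
      simp only [decide_eq_true_eq]; exact (PySem.Int.mod_two_eq c).resolve_right h⟩
  cases h1 : PySem.List.max? (rest.filter (fun c => PySem.Int.mod c 2 = 1)) (fun x => x) with
  | none =>
    have hof : rest.filter (fun c => PySem.Int.mod c 2 = 1) = [] :=
      (PySem.List.max?_eq_none_iff _ _).mp h1
    cases h2 : PySem.List.max? (rest.filter (fun c => PySem.Int.mod c 2 = 0)) (fun x => x) with
    | none =>
      have hef : rest.filter (fun c => PySem.Int.mod c 2 = 0) = [] :=
        (PySem.List.max?_eq_none_iff _ _).mp h2
      simp only
      refine le_antisymm (pv_stepRest_le _ _ _ _ _ _ le_rfl ?_ ?_) hR0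
      · intro c hc h _; exact absurd (hof ▸ hmemOdd c hc h) (List.not_mem_nil)
      · intro c hc h _; exact absurd (hef ▸ hmemEven c hc h) (List.not_mem_nil)
    | some m2 =>
      obtain ⟨hm2r, hm2p⟩ := List.mem_filter.mp (PySem.List.max?_mem h2)
      have hm2p : PySem.Int.mod m2 2 = 0 := by simpa using hm2p
      have hm2max := PySem.List.max?_isMax h2
      simp only
      by_cases ho : odd = -1
      · rw [if_neg (not_not_intro ho)]
        refine le_antisymm (pv_stepRest_le _ _ _ _ _ _ le_rfl ?_ ?_) hR0
        · intro c hc h _; exact absurd (hof ▸ hmemOdd c hc h) (List.not_mem_nil)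
        · intro c _ _ hodd; exact absurd ho hodd
      · rw [if_pos ho]
        refine le_antisymm (pv_stepRest_le _ _ _ _ _ _ (le_max_left _ _) ?_ ?_)
          (max_le hR0 ?_)
        · intro c hc h _; exact absurd (hof ▸ hmemOdd c hc h) (List.not_mem_nil)
        · intro c hc h _
          have : c ≤ m2 := hm2max c (hmemEven c hc h)
          exact le_trans (by omega) (le_max_right _ _)
        · refine hR2 m2 hm2r (by omega) ho
  | some m1 =>
    obtain ⟨hm1r, hm1p⟩ := List.mem_filter.mp (PySem.List.max?_mem h1)
    have hm1p : PySem.Int.mod m1 2 = 1 := by simpa using hm1p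
    have hm1max := PySem.List.max?_isMax h1
    cases h2 : PySem.List.max? (rest.filter (fun c => PySem.Int.mod c 2 = 0)) (fun x => x) with
    | none =>
      have hef : rest.filter (fun c => PySem.Int.mod c 2 = 0) = [] :=
        (PySem.List.max?_eq_none_iff _ _).mp h2
      simp only
      by_cases he : even = -1
      · rw [if_neg (not_not_intro he)]
        refine le_antisymm (pv_stepRest_le _ _ _ _ _ _ le_rfl ?_ ?_) hR0
        · intro c _ _ heven; exact absurd he heven
        · intro c hc h _; exact absurd (hef ▸ hmemEven c hc h) (List.not_mem_nil)
      · rw [if_pos he]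
        refine le_antisymm (pv_stepRest_le _ _ _ _ _ _ (le_max_left _ _) ?_ ?_)
          (max_le hR0 ?_)
        · intro c hc h _
          have : c ≤ m1 := hm1max c (hmemOdd c hc h)
          exact le_trans (by omega) (le_max_right _ _)
        · intro c hc h _; exact absurd (hef ▸ hmemEven c hc h) (List.not_mem_nil)
        · exact hR1 m1 hm1r hm1p he
    | some m2 =>
      obtain ⟨hm2r, hm2p⟩ := List.mem_filter.mp (PySem.List.max?_mem h2)
      have hm2p : PySem.Int.mod m2 2 = 0 := by simpa using hm2p
      have hm2max := PySem.List.max?_isMax h2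
      simp only
      by_cases he : even = -1 <;> by_cases ho : odd = -1
      · rw [if_neg (not_not_intro he), if_neg (not_not_intro ho)]
        refine le_antisymm (pv_stepRest_le _ _ _ _ _ _ le_rfl ?_ ?_) hR0
        · intro c _ _ heven; exact absurd he heven
        · intro c _ _ hodd; exact absurd ho hodd
      · rw [if_neg (not_not_intro he), if_pos ho]
        refine le_antisymm (pv_stepRest_le _ _ _ _ _ _ (le_max_left _ _) ?_ ?_)
          (max_le hR0 ?_)
        · intro c _ _ heven; exact absurd he heven
        · intro c hc h _
          have : c ≤ m2 := hm2max c (hmemEven c hc h)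
          exact le_trans (by omega) (le_max_right _ _)
        · exact hR2 m2 hm2r (by omega) ho
      · rw [if_neg (not_not_intro ho), if_pos he]
        refine le_antisymm (pv_stepRest_le _ _ _ _ _ _ (le_max_left _ _) ?_ ?_)
          (max_le hR0 ?_)
        · intro c hc h _
          have : c ≤ m1 := hm1max c (hmemOdd c hc h)
          exact le_trans (by omega) (le_max_right _ _)
        · intro c _ _ hodd; exact absurd ho hodd
        · exact hR1 m1 hm1r hm1p he
      · rw [if_pos he, if_pos ho]
        refine le_antisymm (pv_stepRest_le _ _ _ _ _ _
            (le_trans (le_max_left _ _) (le_max_left _ _)) ?_ ?_)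
          (max_le (max_le hR0 ?_) ?_)
        · intro c hc h _
          have : c ≤ m1 := hm1max c (hmemOdd c hc h)
          exact le_trans (le_trans (by omega) (le_max_right _ _)) (le_max_left _ _)
        · intro c hc h _
          have : c ≤ m2 := hm2max c (hmemEven c hc h)
          exact le_trans (by omega) (le_max_right _ _)
        · exact hR1 m1 hm1r hm1p he
        · exact hR2 m2 hm2r (by omega) ho

-- sorting after filtering = filtering the sorted list (key is the identity)
theorem pv_sorted_filter (cards : List Int) (p : Int → Bool) :
    PySem.List.sorted (cards.filter p) (fun x => x) true
      = (PySem.List.sorted cards (fun x => x) true).filter p := by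
  refine PySem.List.eq_of_perm_of_pairwise_le_of_injective (fun x : Int => -x)
    neg_injective ?_ ?_ ?_
  · exact (PySem.List.sorted_perm _ _ _).trans
      ((PySem.List.sorted_perm cards (fun x => x) true).filter p).symm
  · exact (PySem.List.sorted_pairwise_rev _ _).imp (fun h => by simpa using neg_le_neg h)
  · exact ((PySem.List.sorted_pairwise_rev cards (fun x => x)).sublist
      List.filter_sublist).imp (fun h => by simpa using neg_le_neg h)

-- the filter of a prefix is a prefix of the filter
theorem pv_filter_take (l : List Int) (p : Int → Bool) (n : Nat) :
    (l.take n).filter p = (l.filter p).take ((l.take n).filter p).length :=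
  List.prefix_iff_eq_take.mp ((List.take_prefix n l).filter p)

-- the filter of a suffix is the matching suffix of the filter
theorem pv_filter_drop (l : List Int) (p : Int → Bool) (n : Nat) :
    (l.drop n).filter p = (l.filter p).drop ((l.take n).filter p).length := by
  have h1 : l.filter p = (l.take n).filter p ++ (l.drop n).filter p := by
    rw [← List.filter_append, List.take_append_drop]
  calc (l.drop n).filter p
      = ((l.take n).filter p ++ (l.drop n).filter p).drop ((l.take n).filter p).length :=
        List.drop_left.symm
    _ = (l.filter p).drop ((l.take n).filter p).length := by rw [← h1]

-- the two parity classes partition the sum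
theorem pv_sum_parity (l : List Int) :
    (l.filter (fun c => PySem.Int.mod c 2 = 1)).sum
      + (l.filter (fun c => PySem.Int.mod c 2 = 0)).sum = l.sum := by
  induction l with
  | nil => simp
  | cons x t ih =>
    rcases PySem.Int.mod_two_eq x with hx | hx
    · rw [List.filter_cons_of_neg (by simp only [decide_eq_true_eq, hx]; decide),
          List.filter_cons_of_pos (by simpa using hx)]
      simp only [List.sum_cons]; omega
    · rw [List.filter_cons_of_pos (by simpa using hx),
          List.filter_cons_of_neg (by simp only [decide_eq_true_eq, hx]; decide)]
      simp only [List.sum_cons]; omega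

-- on a descending list, Python max() is the head
theorem pv_desc_max?_eq_head? (L : List Int) (hL : L.Pairwise (fun a b : Int => b ≤ a)) :
    PySem.List.max? L (fun x => x) = L.head? := by
  cases L with
  | nil => rfl
  | cons x t =>
    obtain ⟨m, hm⟩ : ∃ m, PySem.List.max? (x :: t) (fun x => x) = some m := by
      cases hmax : PySem.List.max? (x :: t) (fun x => x) with
      | none => exact absurd ((PySem.List.max?_eq_none_iff _ _).mp hmax) (by simp)
      | some m => exact ⟨m, rfl⟩
    rw [hm, List.head?_cons]
    have hmx : m ≤ x := by
      rcases List.mem_cons.mp (PySem.List.max?_mem hm) with rfl | hmt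
      · exact le_rfl
      · exact (List.pairwise_cons.mp hL).1 m hmt
    have hxm : x ≤ m := PySem.List.max?_isMax hm x (by simp)
    exact congrArg some (le_antisymm hmx hxm)

-- B's selection loop counts, at each step, the odd and even cards among the top-so-far block
theorem pv_loopB (sc : List Int) (hdesc : sc.Pairwise (fun a b : Int => b ≤ a))
    (n : Nat) (hn : n ≤ sc.length) :
    (PySem.List.pyRange 0 (n : Int) 1).foldl
      (fun ij _ => stepB (sc.filter (fun c => PySem.Int.mod c 2 = 1))
                         (sc.filter (fun c => PySem.Int.mod c 2 = 0)) ij) (0, 0)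
    = ((((sc.take n).filter (fun c => PySem.Int.mod c 2 = 1)).length : Int),
       (((sc.take n).filter (fun c => PySem.Int.mod c 2 = 0)).length : Int)) := by
  induction n with
  | zero =>
    simp [PySem.List.pyRange_one_eq_nil (le_refl (0:Int))]
  | succ m ih =>
    have hm : m < sc.length := by omega
    have h1 : ((m+1 : Nat) : Int) = (m : Int) + 1 := by push_cast; ring
    rw [h1, PySem.List.pyRange_one_succ_right (by positivity), List.foldl_append, ih (by omega)]
    simp only [List.foldl_cons, List.foldl_nil]
    have htake : sc.take (m+1) = sc.take m ++ [sc[m]] := by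
      rw [List.take_add_one]; simp [List.getElem?_eq_getElem hm]
    have hdropm : sc.drop m = sc[m] :: sc.drop (m+1) := List.drop_eq_getElem_cons hm
    have hbelow : ∀ y ∈ sc.drop (m+1), y ≤ sc[m] := by
      have hp : (sc.drop m).Pairwise (fun a b : Int => b ≤ a) :=
        hdesc.sublist (List.drop_sublist m sc)
      rw [hdropm] at hp
      exact (List.pairwise_cons.mp hp).1
    set odds := sc.filter (fun c => PySem.Int.mod c 2 = 1) with hodds
    set evens := sc.filter (fun c => PySem.Int.mod c 2 = 0) with hevens
    set i := ((sc.take m).filter (fun c => PySem.Int.mod c 2 = 1)).length with hi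
    set j := ((sc.take m).filter (fun c => PySem.Int.mod c 2 = 0)).length with hj
    have hod : (sc.drop m).filter (fun c => PySem.Int.mod c 2 = 1) = odds.drop i :=
      pv_filter_drop sc _ m
    have hed : (sc.drop m).filter (fun c => PySem.Int.mod c 2 = 0) = evens.drop j :=
      pv_filter_drop sc _ m
    by_cases hx : PySem.Int.mod sc[m] 2 = 1
    · -- the next card is odd: the odd pointer advances
      have hxe : ¬ (PySem.Int.mod sc[m] 2 = 0) := by rw [hx]; decide
      have hdo : odds.drop i
          = sc[m] :: (sc.drop (m+1)).filter (fun c => PySem.Int.mod c 2 = 1) := by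
        rw [← hod, hdropm, List.filter_cons_of_pos (by simpa using hx)]
      have hde : evens.drop j = (sc.drop (m+1)).filter (fun c => PySem.Int.mod c 2 = 0) := by
        rw [← hed, hdropm,
            List.filter_cons_of_neg (by simp only [decide_eq_true_eq]; exact hxe)]
      have higet : odds[i]? = some sc[m] := by rw [← List.head?_drop, hdo]; rfl
      obtain ⟨hilt, hival⟩ := List.getElem?_eq_some_iff.mp higet
      have hlen1 : ((sc.take (m+1)).filter (fun c => PySem.Int.mod c 2 = 1)).length = i + 1 := by
        rw [htake, List.filter_append, List.filter_cons_of_pos (by simpa using hx)]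
        simp [hi]
      have hlen2 : ((sc.take (m+1)).filter (fun c => PySem.Int.mod c 2 = 0)).length = j := by
        rw [htake, List.filter_append,
            List.filter_cons_of_neg (by simp only [decide_eq_true_eq]; exact hxe)]
        simp [hj]
      have hcond : PySem.List.len evens ≤ ((j : Int)) ∨
          ((i : Int) < PySem.List.len odds ∧
            PySem.List.pyGetD evens (j : Int) 0 ≤ PySem.List.pyGetD odds (i : Int) 0) := by
        by_cases hj2 : j < evens.length
        · refine Or.inr ⟨by simp only [PySem.List.len_eq]; exact_mod_cast hilt, ?_⟩
          have hjv : evens[j]? = some evens[j] := List.getElem?_eq_getElem hj2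
          have h5 : ((sc.drop (m+1)).filter (fun c => PySem.Int.mod c 2 = 0)).head?
              = some evens[j] := by rw [← hde, List.head?_drop, hjv]
          have hmem : evens[j] ∈ (sc.drop (m+1)).filter (fun c => PySem.Int.mod c 2 = 0) := by
            cases hF : (sc.drop (m+1)).filter (fun c => PySem.Int.mod c 2 = 0) with
            | nil => rw [hF] at h5; exact absurd h5 (by simp)
            | cons y ys =>
              rw [hF] at h5
              simp only [List.head?_cons, Option.some.injEq] at h5
              rw [← h5]; exact List.mem_cons_self
          have hle : evens[j] ≤ sc[m] := hbelow _ (List.mem_of_mem_filter hmem)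
          rw [PySem.List.pyGetD_natCast, PySem.List.pyGetD_natCast,
              List.getD_eq_getElem _ _ hj2, List.getD_eq_getElem _ _ hilt, hival]
          exact hle
        · exact Or.inl (by simp only [PySem.List.len_eq]; omega)
      rw [hlen1, hlen2]
      simp only [stepB, if_pos hcond]
      norm_num
    · -- the next card is even: the even pointer advances
      have hx0 : PySem.Int.mod sc[m] 2 = 0 := (PySem.Int.mod_two_eq sc[m]).resolve_right hx
      have hdo : odds.drop i = (sc.drop (m+1)).filter (fun c => PySem.Int.mod c 2 = 1) := by
        rw [← hod, hdropm,
            List.filter_cons_of_neg (by simp only [decide_eq_true_eq]; exact hx)]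
      have hde : evens.drop j
          = sc[m] :: (sc.drop (m+1)).filter (fun c => PySem.Int.mod c 2 = 0) := by
        rw [← hed, hdropm, List.filter_cons_of_pos (by simpa using hx0)]
      have hjget : evens[j]? = some sc[m] := by rw [← List.head?_drop, hde]; rfl
      obtain ⟨hjlt, hjval⟩ := List.getElem?_eq_some_iff.mp hjget
      have hlen1 : ((sc.take (m+1)).filter (fun c => PySem.Int.mod c 2 = 1)).length = i := by
        rw [htake, List.filter_append,
            List.filter_cons_of_neg (by simp only [decide_eq_true_eq]; exact hx)]
        simp [hi]
      have hlen2 : ((sc.take (m+1)).filter (fun c => PySem.Int.mod c 2 = 0)).length = j + 1 := by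
        rw [htake, List.filter_append, List.filter_cons_of_pos (by simpa using hx0)]
        simp [hj]
      have hcond : ¬ (PySem.List.len evens ≤ ((j : Int)) ∨
          ((i : Int) < PySem.List.len odds ∧
            PySem.List.pyGetD evens (j : Int) 0 ≤ PySem.List.pyGetD odds (i : Int) 0)) := by
        rintro (h | ⟨hA, hB⟩)
        · simp only [PySem.List.len_eq] at h; omega
        · simp only [PySem.List.len_eq] at hA
          have hilt : i < odds.length := by exact_mod_cast hA
          have hiv : odds[i]? = some odds[i] := List.getElem?_eq_getElem hilt
          have h5 : ((sc.drop (m+1)).filter (fun c => PySem.Int.mod c 2 = 1)).head?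
              = some odds[i] := by rw [← hdo, List.head?_drop, hiv]
          have hmem : odds[i] ∈ (sc.drop (m+1)).filter (fun c => PySem.Int.mod c 2 = 1) := by
            cases hF : (sc.drop (m+1)).filter (fun c => PySem.Int.mod c 2 = 1) with
            | nil => rw [hF] at h5; exact absurd h5 (by simp)
            | cons y ys =>
              rw [hF] at h5
              simp only [List.head?_cons, Option.some.injEq] at h5
              rw [← h5]; exact List.mem_cons_self
          have hle : odds[i] ≤ sc[m] := hbelow _ (List.mem_of_mem_filter hmem)
          have hparity : PySem.Int.mod odds[i] 2 = 1 := by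
            have := (List.mem_filter.mp hmem).2
            simpa using this
          have hne : odds[i] ≠ sc[m] := fun h => by rw [h, hx0] at hparity; exact absurd hparity (by decide)
          rw [PySem.List.pyGetD_natCast, PySem.List.pyGetD_natCast,
              List.getD_eq_getElem _ _ hjlt, List.getD_eq_getElem _ _ hilt, hjval] at hB
          omega
      rw [hlen1, hlen2]
      simp only [stepB, if_neg hcond]
      norm_num

-- ===== VERDICT (by name: the statement is the Claim_ definition above) =====
theorem maxmiumScore_spec : Claim_equal_maxmiumScore := by
  intro cards cnt _ hpre
  unfold Pre_maxmiumScore at hpre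
  unfold Spec_maxmiumScore
  by_cases hneg : cnt < 0
  · -- empty selection on both sides
    have hr : PySem.List.pyRange 0 cnt 1 = [] := PySem.List.pyRange_one_eq_nil (by omega)
    simp [maxmiumScore, maxmiumScore_alt, hr, PySem.List.slice_to]
  · rw [Int.not_lt] at hneg
    simp only [maxmiumScore, maxmiumScore_alt]
    rw [pv_sorted_filter cards (fun c => decide (PySem.Int.mod c 2 = 1)),
        pv_sorted_filter cards (fun c => decide (PySem.Int.mod c 2 = 0))]
    set sc := PySem.List.sorted cards (fun x => x) true with hsc
    have hlensc : sc.length = cards.length := PySem.List.length_sorted cards (fun x => x) true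
    have hdesc : sc.Pairwise (fun a b : Int => b ≤ a) :=
      PySem.List.sorted_pairwise_rev cards (fun x => x)
    set n := cnt.toNat with hn
    have hcnt : (n : Int) = cnt := Int.toNat_of_nonneg hneg
    have hnle : n ≤ sc.length := by omega
    rw [← hcnt]
    rw [pv_foldl_range_take sc 0 stepTopA ((0:Int), (-1:Int), (-1:Int)) n hnle]
    rw [pv_stepTopA_foldl]
    rw [pv_loopB sc hdesc n hnle]
    simp only [PySem.List.slice_to_natCast]
    rw [← pv_filter_take sc (fun c => decide (PySem.Int.mod c 2 = 1)) n,
        ← pv_filter_take sc (fun c => decide (PySem.Int.mod c 2 = 0)) n]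
    rw [pv_sum_parity (sc.take n)]
    simp only [zero_add]
    by_cases hpar : PySem.Int.mod (sc.take n).sum 2 = 0
    · rw [if_pos hpar, if_pos hpar]
    · rw [if_neg hpar, if_neg hpar]
      rw [PySem.List.foldl_pyRange_pyGetD sc 0
          (stepRestA (sc.take n).sum
            (List.foldl (fun acc c => if PySem.Int.mod c 2 = 1 then c else acc) (-1) (sc.take n))
            (List.foldl (fun acc c => if PySem.Int.mod c 2 = 1 then acc else c) (-1) (sc.take n)))
          0 (by positivity : (0:Int) ≤ (n:Int))]
      simp only [Int.toNat_natCast]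
      rw [pv_odd_fold, pv_even_fold, pv_rest_eq]
      -- abbreviations
      set odds := sc.filter (fun c => PySem.Int.mod c 2 = 1) with hodds
      set evens := sc.filter (fun c => PySem.Int.mod c 2 = 0) with hevens
      set i := ((sc.take n).filter (fun c => PySem.Int.mod c 2 = 1)).length with hi
      set j := ((sc.take n).filter (fun c => PySem.Int.mod c 2 = 0)).length with hj
      set tmp := (sc.take n).sum with htmp
      -- the two rest-side maxima are the elements at the pointers
      have hdropdesc : ∀ p : Int → Bool, ((sc.drop n).filter p).Pairwise (fun a b : Int => b ≤ a) :=
        fun p => (hdesc.sublist (List.drop_sublist n sc)).sublist List.filter_sublist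
      have hmax1 : PySem.List.max? ((sc.drop n).filter (fun c => PySem.Int.mod c 2 = 1))
          (fun x => x) = odds[i]? := by
        rw [pv_desc_max?_eq_head? _ (hdropdesc _), pv_filter_drop sc _ n, List.head?_drop]
      have hmax2 : PySem.List.max? ((sc.drop n).filter (fun c => PySem.Int.mod c 2 = 0))
          (fun x => x) = evens[j]? := by
        rw [pv_desc_max?_eq_head? _ (hdropdesc _), pv_filter_drop sc _ n, List.head?_drop]
      rw [hmax1, hmax2]
      -- the trackers of A are what B reads off the pointers
      have hoddT : ((sc.take n).filter (fun c => PySem.Int.mod c 2 = 1)).getLast?.getD (-1)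
          = (if 0 < (i:Int) then PySem.List.pyGetD odds ((i:Int) - 1) 0 else -1) := by
        rcases Nat.eq_zero_or_pos i with h0 | hpos
        · have hnil : (sc.take n).filter (fun c => PySem.Int.mod c 2 = 1) = [] :=
            List.length_eq_zero_iff.mp h0
          rw [hnil, if_neg (by simp [h0] : ¬ (0:Int) < (i:Int))]
          rfl
        · have hto : (sc.take n).filter (fun c => PySem.Int.mod c 2 = 1) = odds.take i :=
            pv_filter_take sc _ n
          have hlen : (odds.take i).length = i := by rw [← hto]
          have hile : i ≤ odds.length := by
            have h' := hlen; rw [List.length_take] at h'; omega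
          have hlt : i - 1 < odds.length := by omega
          rw [if_pos (by exact_mod_cast hpos), hto, List.getLast?_eq_getElem?, hlen,
              List.getElem?_take_of_lt (by omega), List.getElem?_eq_getElem hlt,
              show ((i:Int) - 1) = ((i - 1 : Nat) : Int) by omega,
              PySem.List.pyGetD_natCast, List.getD_eq_getElem _ _ hlt]
          rfl
      have hevenT : ((sc.take n).filter (fun c => PySem.Int.mod c 2 = 0)).getLast?.getD (-1)
          = (if 0 < (j:Int) then PySem.List.pyGetD evens ((j:Int) - 1) 0 else -1) := by
        rcases Nat.eq_zero_or_pos j with h0 | hpos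
        · have hnil : (sc.take n).filter (fun c => PySem.Int.mod c 2 = 0) = [] :=
            List.length_eq_zero_iff.mp h0
          rw [hnil, if_neg (by simp [h0] : ¬ (0:Int) < (j:Int))]
          rfl
        · have hto : (sc.take n).filter (fun c => PySem.Int.mod c 2 = 0) = evens.take j :=
            pv_filter_take sc _ n
          have hlen : (evens.take j).length = j := by rw [← hto]
          have hjle : j ≤ evens.length := by
            have h' := hlen; rw [List.length_take] at h'; omega
          have hlt : j - 1 < evens.length := by omega
          rw [if_pos (by exact_mod_cast hpos), hto, List.getLast?_eq_getElem?, hlen,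
              List.getElem?_take_of_lt (by omega), List.getElem?_eq_getElem hlt,
              show ((j:Int) - 1) = ((j - 1 : Nat) : Int) by omega,
              PySem.List.pyGetD_natCast, List.getD_eq_getElem _ _ hlt]
          rfl
      rw [hoddT, hevenT]
      set oddT := (if 0 < (i:Int) then PySem.List.pyGetD odds ((i:Int) - 1) 0 else -1) with hoT
      set evenT := (if 0 < (j:Int) then PySem.List.pyGetD evens ((j:Int) - 1) 0 else -1) with heT
      simp only [PySem.List.len_eq]
      cases h1 : odds[i]? with
      | none =>
        have hige : ¬ ((i:Int) < (odds.length : Int)) := by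
          have := List.getElem?_eq_none_iff.mp h1; omega
        cases h2 : evens[j]? with
        | none =>
          have hjge : ¬ ((j:Int) < (evens.length : Int)) := by
            have := List.getElem?_eq_none_iff.mp h2; omega
          simp [hige, hjge]
        | some b =>
          obtain ⟨hjlt, hjval⟩ := List.getElem?_eq_some_iff.mp h2
          have hjlt' : (j:Int) < (evens.length : Int) := by exact_mod_cast hjlt
          have hb : PySem.List.pyGetD evens (j:Int) 0 = b := by
            rw [PySem.List.pyGetD_natCast, List.getD_eq_getElem _ _ hjlt, hjval]
          by_cases ho : oddT = -1 <;> simp [hige, hjlt', hb, ho]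
      | some a =>
        obtain ⟨hilt, hival⟩ := List.getElem?_eq_some_iff.mp h1
        have hilt' : (i:Int) < (odds.length : Int) := by exact_mod_cast hilt
        have ha : PySem.List.pyGetD odds (i:Int) 0 = a := by
          rw [PySem.List.pyGetD_natCast, List.getD_eq_getElem _ _ hilt, hival]
        cases h2 : evens[j]? with
        | none =>
          have hjge : ¬ ((j:Int) < (evens.length : Int)) := by
            have := List.getElem?_eq_none_iff.mp h2; omega
          by_cases he : evenT = -1 <;> simp [hilt', hjge, ha, he]
        | some b =>
          obtain ⟨hjlt, hjval⟩ := List.getElem?_eq_some_iff.mp h2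
          have hjlt' : (j:Int) < (evens.length : Int) := by exact_mod_cast hjlt
          have hb : PySem.List.pyGetD evens (j:Int) 0 = b := by
            rw [PySem.List.pyGetD_natCast, List.getD_eq_getElem _ _ hjlt, hjval]
          by_cases he : evenT = -1 <;> by_cases ho : oddT = -1 <;>
            simp [hilt', hjlt', ha, hb, he, ho]
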